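-- pv_equiv track=rewrite | github.com/mush60/altera-batch5- | Struktur Data/Problem 2/1-Statistik.py | maximal
-- ===== SOURCE A (Python) =====
-- def maximal(lists) :
--     res = []
--     for ls in lists :
--         for i in range(len(ls)) :
--             for j in range(i+1, len(ls)) :
--                 if ls[i] < ls[j] :
--                     temp = ls[i]
--                     ls[i] = ls[j]
--                     ls[j] = temp
--         res.append(str(ls[0]))
--     return res
-- ===== SOURCE B (Python) =====
-- def maximal(lists):
--     # Return value equals A's; unlike A, it does not sort the inner lists in place.
--     return [str(max(ls)) for ls in lists]
-- ===== Notes on version B (the rewrite author's own statement) =====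
-- stated objective: faster
-- what changed: Replaces the nested selection-sort loops (full descending sort per inner list just to read index 0) with a single-pass max() per inner list; B does not mutate the inner lists, the equivalence is about the return value only.
import Mathlib
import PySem

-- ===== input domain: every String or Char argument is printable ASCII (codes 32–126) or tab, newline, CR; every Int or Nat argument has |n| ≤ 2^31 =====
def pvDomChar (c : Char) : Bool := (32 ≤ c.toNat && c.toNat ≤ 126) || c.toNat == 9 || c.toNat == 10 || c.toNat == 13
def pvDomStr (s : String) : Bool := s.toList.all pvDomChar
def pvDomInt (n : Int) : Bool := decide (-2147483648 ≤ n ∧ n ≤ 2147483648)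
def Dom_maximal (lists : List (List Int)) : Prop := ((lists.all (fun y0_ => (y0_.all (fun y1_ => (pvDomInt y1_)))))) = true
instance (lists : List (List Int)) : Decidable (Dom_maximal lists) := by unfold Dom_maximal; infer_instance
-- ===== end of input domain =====

-- B replaces A's per-inner-list selection sort (read at index 0) with a one-pass max;
-- return value only: A sorts each inner list in place, B does not mutate its argument.

-- ===== PORT A =====
-- body of A's innermost 'if ls[i] < ls[j]: temp = ls[i]; ls[i] = ls[j]; ls[j] = temp';
-- the indices range() produces are always in range, so the total pyGetD/pySetD forms are exact
def pvSwapA (l : List Int) (i j : Int) : List Int :=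
  if PySem.List.pyGetD l i 0 < PySem.List.pyGetD l j 0 then
    let temp := PySem.List.pyGetD l i 0
    let l1 := PySem.List.pySetD l i (PySem.List.pyGetD l j 0)
    PySem.List.pySetD l1 j temp
  else l

-- A's two nested 'for i in range(len(ls)) / for j in range(i+1, len(ls))' loops over one inner list
def pvSortA (ls : List Int) : List Int :=
  (PySem.List.pyRange 0 (ls.length : Int) 1).foldl (fun l i =>
    (PySem.List.pyRange (i+1) (l.length : Int) 1).foldl (fun l' j => pvSwapA l' i j) l) ls

-- 'ls[0]' on an empty inner list raises IndexError in Python; those inputs are excluded by Pre_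
def maximal (lists : List (List Int)) : List String :=
  lists.foldl (fun res ls =>
    res ++ [PySem.Int.toStr (PySem.List.pyGetD (pvSortA ls) 0 0)]) []

-- ===== PORT B =====
-- 'max(ls)' raises ValueError on an empty ls; those inputs are excluded by Pre_
def maximal_alt (lists : List (List Int)) : List String :=
  lists.map (fun ls => PySem.Int.toStr ((PySem.List.max? ls (fun y => y)).getD 0))

-- ===== PRECONDITION & SPEC =====
-- Pre_ excludes inputs containing an empty inner list, on which A raises IndexError (ls[0]) and B raises ValueError (max([])).
def Pre_maximal (lists : List (List Int)) : Prop := ∀ ls ∈ lists, ls ≠ []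
instance (lists : List (List Int)) : Decidable (Pre_maximal lists) := by unfold Pre_maximal; infer_instance
def pvWitness_maximal : List (List Int) := [[3, 1, 4], [-2, -7], [5]]
def Spec_maximal (lists : List (List Int)) (out : List String) : Prop := out = maximal_alt lists
instance (lists : List (List Int)) (out : List String) : Decidable (Spec_maximal lists out) := by unfold Spec_maximal; infer_instance

-- ===== CLAIM (what is proved, stated in full; the proofs are below) =====
def Claim_equal_maximal : Prop := ∀ (lists : List (List Int)), Dom_maximal lists → Pre_maximal lists → Spec_maximal lists (maximal lists)

-- ===== LEMMAS AND PROOFS =====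

-- setting at a nonzero index keeps the head
theorem pv_head_set (l : List Int) (m : Nat) (v : Int) (hm : m ≠ 0) :
    PySem.List.pyGetD (l.set m v) 0 0 = PySem.List.pyGetD l 0 0 := by
  simp [PySem.List.pyGetD_zero, List.getD]
  rw [List.getElem?_set_ne (by omega)]

-- pvSwapA with both indices ≥ 1 keeps the head
theorem pv_swap_head (l : List Int) (i j : Int) (hi : 1 ≤ i) (hj : 1 ≤ j) :
    PySem.List.pyGetD (pvSwapA l i j) 0 0 = PySem.List.pyGetD l 0 0 := by
  simp only [pvSwapA]
  split_ifs with h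
  · rw [PySem.List.pySetD_of_nonneg (h := by omega), PySem.List.pySetD_of_nonneg (h := by omega),
        pv_head_set _ _ _ (by omega), pv_head_set _ _ _ (by omega)]
  · rfl

-- pvSwapA at indices 0 and k (1 ≤ k < len): length kept, head becomes the larger value, tail past k kept
theorem pv_swap0 (l : List Int) (k : Int) (h1 : 1 ≤ k) (h2 : k < l.length) :
    (pvSwapA l 0 k).length = l.length ∧
    PySem.List.pyGetD (pvSwapA l 0 k) 0 0 = max (PySem.List.pyGetD l 0 0) (PySem.List.pyGetD l k 0) ∧
    (pvSwapA l 0 k).drop (k.toNat+1) = l.drop (k.toNat+1) := by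
  simp only [pvSwapA]
  split_ifs with h
  · rw [PySem.List.pySetD_of_nonneg (h := by omega), PySem.List.pySetD_of_nonneg (h := by omega)]
    refine ⟨by simp, ?_, ?_⟩
    · rw [pv_head_set _ _ _ (by omega), max_eq_right (le_of_lt h)]
      have hlen : 0 < l.length := by omega
      simp [PySem.List.pyGetD_zero, List.getD, hlen]
    · rw [List.drop_set_of_lt (by omega), List.drop_set_of_lt (by omega)]
  · exact ⟨rfl, by rw [max_eq_left (le_of_not_gt h)], rfl⟩

-- the i = 0 inner loop from j = k on turns the head into the running max of head and l[k:]
theorem pv_inner0 (d : Nat) : ∀ (k : Int) (l : List Int), 1 ≤ k →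
    d = ((l.length : Int) - k).toNat →
    PySem.List.pyGetD ((PySem.List.pyRange k (l.length : Int) 1).foldl
        (fun l' j => pvSwapA l' 0 j) l) 0 0
      = (l.drop k.toNat).foldl max (PySem.List.pyGetD l 0 0) := by
  induction d with
  | zero =>
      intro k l hk hd
      rw [PySem.List.pyRange_one_eq_nil (by omega)]
      rw [List.drop_eq_nil_of_le (by omega)]
      rfl
  | succ d ih =>
      intro k l hk hd
      have hkl : k < (l.length : Int) := by omega
      obtain ⟨hlen, hhead, hdrop⟩ := pv_swap0 l k hk hkl
      rw [PySem.List.pyRange_one_cons hkl, List.foldl_cons]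
      rw [show ((l.length : Int)) = ((pvSwapA l 0 k).length : Int) by rw [hlen]]
      rw [ih (k+1) (pvSwapA l 0 k) (by omega) (by rw [hlen]; omega)]
      rw [hhead, show (k+1).toNat = k.toNat + 1 by omega, hdrop]
      have hkn : k.toNat < l.length := by omega
      rw [List.drop_eq_getElem_cons hkn, List.foldl_cons]
      congr 2
      rw [PySem.List.pyGetD_eq_getElem l 0 (by omega) hkl]

-- an inner loop with i ≥ 1 (all its j ≥ 1) keeps the head
theorem pv_inner_preserve (r : List Int) (i : Int) (hi : 1 ≤ i) (hr : ∀ j ∈ r, 1 ≤ j) (l : List Int) :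
    PySem.List.pyGetD (r.foldl (fun l' j => pvSwapA l' i j) l) 0 0 = PySem.List.pyGetD l 0 0 := by
  induction r generalizing l with
  | nil => rfl
  | cons a r ih =>
      simp only [List.foldl_cons]
      rw [ih (fun j hj => hr j (List.mem_cons_of_mem _ hj)),
          pv_swap_head _ _ _ hi (hr a (List.mem_cons_self))]

-- the outer iterations with i ≥ 1 keep the head
theorem pv_outer_preserve (r : List Int) (hr : ∀ i ∈ r, 1 ≤ i) (l : List Int) :
    PySem.List.pyGetD (r.foldl (fun l i =>
        (PySem.List.pyRange (i+1) (l.length : Int) 1).foldl (fun l' j => pvSwapA l' i j) l) l) 0 0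
      = PySem.List.pyGetD l 0 0 := by
  induction r generalizing l with
  | nil => rfl
  | cons a r ih =>
      simp only [List.foldl_cons]
      rw [ih (fun i hi => hr i (List.mem_cons_of_mem _ hi))]
      exact pv_inner_preserve _ a (hr a List.mem_cons_self)
        (fun j hj => by have h1 := (PySem.List.mem_pyRange_one.mp hj).1
                        have h2 := hr a List.mem_cons_self; omega) l

-- head of A's sorted list = value of max(ls)
theorem pv_sortA_head (ls : List Int) (h : ls ≠ []) :
    PySem.List.pyGetD (pvSortA ls) 0 0 = (PySem.List.max? ls (fun y => y)).getD 0 := by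
  obtain ⟨x, t, rfl⟩ := List.exists_cons_of_ne_nil h
  simp only [pvSortA]
  have hpos : (0:Int) < (((x :: t).length : Int)) := by
    simp only [List.length_cons]; omega
  rw [PySem.List.pyRange_one_cons hpos]
  simp only [List.foldl_cons]
  have e : (0:Int) + 1 = 1 := by norm_num
  rw [e]
  rw [pv_outer_preserve _ (fun i hi => (PySem.List.mem_pyRange_one.mp hi).1) _]
  rw [pv_inner0 (((((x :: t).length : Int)) - 1).toNat) 1 (x :: t) (by omega) rfl]
  rw [show (1:Int).toNat = 1 from rfl]
  simp [PySem.List.max?_id_cons, PySem.List.pyGetD_zero_cons]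

theorem pv_foldl_app (lists : List (List Int)) (init : List String) :
    lists.foldl (fun res ls =>
      res ++ [PySem.Int.toStr (PySem.List.pyGetD (pvSortA ls) 0 0)]) init
    = init ++ lists.map (fun ls => PySem.Int.toStr (PySem.List.pyGetD (pvSortA ls) 0 0)) := by
  induction lists generalizing init with
  | nil => simp
  | cons a t ih => simp [ih]

-- ===== VERDICT (by name: the statement is the Claim_ definition above) =====
theorem maximal_spec : Claim_equal_maximal := by
  intro lists _ hpre
  unfold Spec_maximal maximal maximal_alt
  rw [pv_foldl_app, List.nil_append]
  exact List.map_congr_left (fun ls hls => by rw [pv_sortA_head ls (hpre ls hls)])
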